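-- pv_equiv track=rewrite | github.com/jomimc/imperfect_fifths | Src/MonteCarlo/model_ver_5.py | calculate_distance_between_windows
-- ===== SOURCE A (Python) =====
-- def calculate_distance_between_windows(ints, w):
--     windows = [[ints[0]]]
--     for i in ints[1:]:
--         if i - windows[-1][0] < w:
--             windows[-1].append(i)
--         else:
--             windows.append([i])
--     if len(windows) == 1:
--         return 0
--     else:
--         dist = [windows[i+1][0] - windows[i][-1] for i in range(len(windows)-1)]
--         return min(dist)
-- ===== SOURCE B (Python) =====
-- def calculate_distance_between_windows(ints, w):
--     start = last = ints[0]
--     min_dist = None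
--     for i in ints[1:]:
--         if i - start < w:
--             last = i
--         else:
--             gap = i - last
--             min_dist = gap if min_dist is None else min(min_dist, gap)
--             start = last = i
--     return 0 if min_dist is None else min_dist
-- ===== Notes on version B (the rewrite author's own statement) =====
-- stated objective: simpler
-- what changed: Replaces A's two-phase algorithm (build an explicit list-of-lists of windows, then a second comprehension pass over window boundaries and min()) by a single streaming loop over three scalars: current window start, current window last, and the running minimum gap, recorded at the moment a window closes.
-- outside the precondition, e.g. on calculate_distance_between_windows([], 3): A raises IndexError, B raises IndexError
import Mathlib
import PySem

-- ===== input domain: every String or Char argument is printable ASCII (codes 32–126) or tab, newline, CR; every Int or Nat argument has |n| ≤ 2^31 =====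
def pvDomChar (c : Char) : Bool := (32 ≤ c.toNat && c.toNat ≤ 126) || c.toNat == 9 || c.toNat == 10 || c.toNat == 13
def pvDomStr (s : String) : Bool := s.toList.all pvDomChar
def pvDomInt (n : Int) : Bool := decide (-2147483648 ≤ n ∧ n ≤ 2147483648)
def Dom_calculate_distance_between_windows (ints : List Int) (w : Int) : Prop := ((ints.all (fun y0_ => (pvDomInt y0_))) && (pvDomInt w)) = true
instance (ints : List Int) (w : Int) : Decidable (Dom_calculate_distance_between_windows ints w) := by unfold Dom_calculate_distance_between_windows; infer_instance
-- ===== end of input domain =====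

-- B replaces A's windows list-of-lists plus second gap pass by a single streaming loop
-- over three scalars (window start, window last, running min gap); equivalence of the
-- return values is proved for every nonempty ints (A raises IndexError on []).

-- ===== PORT A =====
-- Loop body of A: windows[-1][0] / windows[-1].append(i) are exact via getLastD since
-- windows is never empty and every window is nonempty (seeded with [[ints[0]]]).
def pvStepA (w : Int) (ws : List (List Int)) (i : Int) : List (List Int) :=
  if i - (ws.getLastD []).headD 0 < w then ws.dropLast ++ [ws.getLastD [] ++ [i]]
  else ws ++ [[i]]

def calculate_distance_between_windows (ints : List Int) (w : Int) : Int :=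
  match ints with
  | [] => 0  -- ints[0] raises IndexError in Python; excluded by Pre_
  | h :: t =>
    -- windows = [[ints[0]]]; for i in ints[1:]: …  (ints[1:] of h :: t is t, exact)
    let windows := t.foldl (pvStepA w) [[h]]
    if windows.length = 1 then 0
    else
      -- dist = [windows[i+1][0] - windows[i][-1] for i in range(len(windows)-1)]; min(dist)
      -- indices are in range and every window nonempty, so getD/headD/getLastD are exact
      (PySem.List.min?
        ((List.range (windows.length - 1)).map
          (fun i => (windows.getD (i + 1) []).headD 0 - (windows.getD i []).getLastD 0))
        (fun x => x)).getD 0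

-- ===== PORT B =====
-- Loop body of B over the state (start, last, min_dist).
def pvStepB (w : Int) (s : Int × Int × Option Int) (i : Int) : Int × Int × Option Int :=
  if i - s.1 < w then (s.1, i, s.2.2)
  else (i, i, some (match s.2.2 with | none => i - s.2.1 | some m => min m (i - s.2.1)))

def calculate_distance_between_windows_alt (ints : List Int) (w : Int) : Int :=
  match ints with
  | [] => 0  -- ints[0] raises IndexError in Python; excluded by Pre_
  | h :: t => ((t.foldl (pvStepB w) (h, h, none)).2.2).getD 0

-- ===== PRECONDITION & SPEC =====
-- Pre_ excludes exactly the empty list, on which A (and B) raise IndexError at ints[0].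
def Pre_calculate_distance_between_windows (ints : List Int) (w : Int) : Prop := ints ≠ []
instance (ints : List Int) (w : Int) : Decidable (Pre_calculate_distance_between_windows ints w) := by
  unfold Pre_calculate_distance_between_windows; infer_instance

def pvWitness_calculate_distance_between_windows : List Int × Int := ([0, 1, 5, 9], 3)

def Spec_calculate_distance_between_windows (ints : List Int) (w : Int) (out : Int) : Prop :=
  out = calculate_distance_between_windows_alt ints w
instance (ints : List Int) (w : Int) (out : Int) : Decidable (Spec_calculate_distance_between_windows ints w out) := by
  unfold Spec_calculate_distance_between_windows; infer_instance

-- ===== CLAIM (what is proved, stated in full; the proofs are below) =====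
def Claim_equal_calculate_distance_between_windows : Prop :=
  ∀ (ints : List Int) (w : Int), Dom_calculate_distance_between_windows ints w →
    Pre_calculate_distance_between_windows ints w →
    Spec_calculate_distance_between_windows ints w (calculate_distance_between_windows ints w)

-- ===== LEMMAS AND PROOFS =====

-- gaps between consecutive windows, recursively (proved equal to A's range-comprehension)
def gapsOf : List (List Int) → List Int
  | [] => []
  | [_] => []
  | a :: b :: rest => ((b.headD 0) - (a.getLastD 0)) :: gapsOf (b :: rest)

lemma range_gaps (ws : List (List Int)) :
    (List.range (ws.length - 1)).map
      (fun i => (ws.getD (i + 1) []).headD 0 - (ws.getD i []).getLastD 0) = gapsOf ws := by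
  induction ws with
  | nil => simp [gapsOf]
  | cons a ws ih =>
    cases ws with
    | nil => simp [gapsOf]
    | cons b rest =>
      have : (a :: b :: rest).length - 1 = ((b :: rest).length - 1) + 1 := by
        simp [List.length]
      rw [this, List.range_succ_eq_map, List.map_cons, List.map_map]
      simp only [gapsOf, List.getD_cons_succ, List.getD_cons_zero]
      exact congrArg _ (ih)

lemma gaps_replace_last (ws' : List (List Int)) (u v : List Int)
    (h : u.headD 0 = v.headD 0) : gapsOf (ws' ++ [u]) = gapsOf (ws' ++ [v]) := by
  induction ws' with
  | nil => simp [gapsOf]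
  | cons a t ih =>
    cases t with
    | nil => simp only [List.cons_append, List.nil_append, gapsOf, h]
    | cons b r => simpa [gapsOf] using ih

lemma gaps_append (ws' : List (List Int)) (lw : List Int) (x : Int) :
    gapsOf (ws' ++ [lw] ++ [[x]]) = gapsOf (ws' ++ [lw]) ++ [x - lw.getLastD 0] := by
  induction ws' with
  | nil => simp [gapsOf]
  | cons a t ih =>
    cases t with
    | nil => simp [gapsOf]
    | cons b r => simpa [gapsOf] using ih

lemma min?_id_append_singleton (g : List Int) (x : Int) :
    PySem.List.min? (g ++ [x]) (fun y => y) =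
      some (match PySem.List.min? g (fun y => y) with | none => x | some m => min m x) := by
  cases g with
  | nil => rw [List.nil_append, PySem.List.min?_id_cons]; simp [PySem.List.min?]
  | cons h t =>
    rw [List.cons_append, PySem.List.min?_id_cons, PySem.List.min?_id_cons,
      List.foldl_append]
    simp

-- the simulation invariant between A's windows and B's scalar state
def pvInv (ws : List (List Int)) (s : Int × Int × Option Int) : Prop :=
  ws ≠ [] ∧ (∀ win ∈ ws, win ≠ []) ∧
  s.1 = (ws.getLastD []).headD 0 ∧ s.2.1 = (ws.getLastD []).getLastD 0 ∧
  s.2.2 = PySem.List.min? (gapsOf ws) (fun x => x)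

lemma step_inv (w : Int) (ws : List (List Int)) (s : Int × Int × Option Int) (i : Int)
    (h : pvInv ws s) : pvInv (pvStepA w ws i) (pvStepB w s i) := by
  obtain ⟨hne, hwin, h1, h2, h3⟩ := h
  obtain rfl | ⟨ws', lw, rfl⟩ := ws.eq_nil_or_concat
  · exact absurd rfl hne
  simp only [List.concat_eq_append] at hne hwin h1 h2 h3 ⊢
  have hlw : lw ≠ [] := hwin lw (by simp)
  have hgl : (ws' ++ [lw]).getLastD [] = lw := by simp
  rw [hgl] at h1 h2
  unfold pvStepA pvStepB
  rw [hgl, List.dropLast_concat, h1, h2]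
  by_cases hc : i - lw.headD 0 < w
  · rw [if_pos hc, if_pos hc]
    refine ⟨by simp, ?_, ?_, ?_, ?_⟩
    · intro win hw
      rcases List.mem_append.mp hw with h' | h'
      · exact hwin win (List.mem_append.mpr (Or.inl h'))
      · simp only [List.mem_singleton] at h'; subst h'; simp
    · show lw.headD 0 = ((ws' ++ [lw ++ [i]]).getLastD []).headD 0
      have : (ws' ++ [lw ++ [i]]).getLastD [] = lw ++ [i] := by simp
      rw [this]
      cases lw with
      | nil => exact absurd rfl hlw
      | cons a t => simp
    · have : (ws' ++ [lw ++ [i]]).getLastD [] = lw ++ [i] := by simp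
      rw [this]
      simp [List.getLastD_eq_getLast?]
    · show s.2.2 = PySem.List.min? (gapsOf (ws' ++ [lw ++ [i]])) (fun x => x)
      rw [h3]
      exact congrArg (fun g => PySem.List.min? g (fun x => x))
        (gaps_replace_last ws' lw (lw ++ [i]) (by
          cases lw with
          | nil => exact absurd rfl hlw
          | cons a t => simp))
  · rw [if_neg hc, if_neg hc]
    refine ⟨by simp, ?_, ?_, ?_, ?_⟩
    · intro win hw
      rcases List.mem_append.mp hw with h' | h'
      · exact hwin win h'
      · simp only [List.mem_singleton] at h'; subst h'; simp
    · have : (ws' ++ [lw] ++ [[i]]).getLastD [] = [i] := by simp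
      rw [this]; simp
    · have : (ws' ++ [lw] ++ [[i]]).getLastD [] = [i] := by simp
      rw [this]; simp
    · rw [gaps_append, min?_id_append_singleton, ← h3]

lemma loop_inv (w : Int) (t : List Int) :
    ∀ (ws : List (List Int)) (s : Int × Int × Option Int), pvInv ws s →
      pvInv (t.foldl (pvStepA w) ws) (t.foldl (pvStepB w) s) := by
  induction t with
  | nil => intro ws s h; exact h
  | cons i t ih => intro ws s h; exact ih _ _ (step_inv w ws s i h)

lemma gapsOf_eq_nil_iff (ws : List (List Int)) (h : ws ≠ []) :
    gapsOf ws = [] ↔ ws.length = 1 := by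
  match ws with
  | [] => exact absurd rfl h
  | [a] => simp [gapsOf]
  | a :: b :: r => simp [gapsOf]

-- ===== VERDICT (by name: the statement is the Claim_ definition above) =====
theorem calculate_distance_between_windows_spec : Claim_equal_calculate_distance_between_windows := by
  intro ints w _ hpre
  unfold Spec_calculate_distance_between_windows
  cases ints with
  | nil => exact absurd rfl hpre
  | cons h t =>
    simp only [calculate_distance_between_windows, calculate_distance_between_windows_alt]
    have hinv : pvInv [[h]] (h, h, none) := by
      refine ⟨by simp, by simp, by simp, by simp, by simp [gapsOf, PySem.List.min?]⟩
    have hfin := loop_inv w t [[h]] (h, h, none) hinv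
    obtain ⟨hne, _, _, _, h3⟩ := hfin
    set ws := t.foldl (pvStepA w) [[h]] with hws
    set s := t.foldl (pvStepB w) (h, h, none) with hs
    rw [range_gaps]
    by_cases hl : ws.length = 1
    · have : gapsOf ws = [] := (gapsOf_eq_nil_iff ws hne).mpr hl
      simp only [hl, if_pos]
      rw [h3, this]
      simp [PySem.List.min?]
    · have hg : gapsOf ws ≠ [] := by
        intro hc; exact hl ((gapsOf_eq_nil_iff ws hne).mp hc)
      simp only [hl, if_neg, not_false_iff]
      rw [h3]
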